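-- pv_equiv track=rewrite | github.com/Affi-Amine/DT-challenges | challenge_3/src/speaker_normalizer.py | assign_speaker_numbers
-- ===== SOURCE A (Python) =====
-- from typing import Dict, List, Set, Optional, Tuple
--
-- def assign_speaker_numbers(speakers: List[str],
--                          start_number: int = 1) -> Dict[str, str]:
--     """
--     Assign sequential numbers to speakers.
--
--     Args:
--         speakers: List of speaker names
--         start_number: Starting number for assignment
--
--     Returns:
--         Dictionary mapping original names to numbered format
--     """
--     unique_speakers = list(dict.fromkeys(speakers))  # Preserve order, remove duplicates
--
--     mapping = {}
--     current_number = start_number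
--
--     for speaker in unique_speakers:
--         if speaker and speaker != "UNKNOWN":
--             mapping[speaker] = f"Speaker {current_number}"
--             current_number += 1
--         else:
--             mapping[speaker] = "Unknown Speaker"
--
--     return mapping
-- ===== SOURCE B (Python) =====
-- def assign_speaker_numbers(speakers, start_number=1):
--     # Keep each speaker at its first occurrence, by index arithmetic (no seen-set, no counter).
--     unique = [s for i, s in enumerate(speakers) if speakers.index(s) == i]
--     # A speaker's number is start_number plus how many valid speakers precede it.
--     return {s: ("Speaker %d" % (start_number + sum(1 for t in unique[:i] if t and t != "UNKNOWN"))
--                 if s and s != "UNKNOWN" else "Unknown Speaker")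
--             for i, s in enumerate(unique)}
-- ===== Notes on version B (the rewrite author's own statement) =====
-- stated objective: alternative
-- what changed: Replaces A's stateful pass (dict.fromkeys dedup plus a running counter) by stateless index arithmetic: keep each speaker whose first occurrence index equals its position, and compute each label as start_number plus the count of valid speakers in the prefix before it.
import Mathlib
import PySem

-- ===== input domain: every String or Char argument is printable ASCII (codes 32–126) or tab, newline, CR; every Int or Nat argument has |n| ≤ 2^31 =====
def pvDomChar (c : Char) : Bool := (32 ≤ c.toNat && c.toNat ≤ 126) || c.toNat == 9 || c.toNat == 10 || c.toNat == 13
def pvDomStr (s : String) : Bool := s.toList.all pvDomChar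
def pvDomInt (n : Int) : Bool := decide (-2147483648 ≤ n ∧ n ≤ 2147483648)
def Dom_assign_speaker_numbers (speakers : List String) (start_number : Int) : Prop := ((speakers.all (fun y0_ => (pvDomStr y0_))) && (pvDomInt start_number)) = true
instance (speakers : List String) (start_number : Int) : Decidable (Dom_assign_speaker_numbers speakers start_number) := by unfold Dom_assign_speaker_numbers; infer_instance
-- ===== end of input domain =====

-- B replaces A's stateful pass (ordered dedup + running counter) by stateless index
-- arithmetic: keep a speaker iff its first-occurrence index equals its position, and label
-- it by start_number plus the count of valid speakers among its predecessors (alternative).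

-- the condition 'speaker and speaker != "UNKNOWN"' (identical in both sources)
def pvIsValid (s : String) : Bool := !(s == "") && !(s == "UNKNOWN")

-- ===== PORT A =====
-- A's for-loop over the deduplicated list, carrying the mapping dict and the counter.
def pvLoopA : List String → Int → PySem.Dict String String → PySem.Dict String String
  | [], _, m => m
  | s :: rest, n, m =>
    if pvIsValid s then
      pvLoopA rest (n + 1) (m.insert s ("Speaker " ++ PySem.Int.toStr n))
    else
      pvLoopA rest n (m.insert s "Unknown Speaker")

def assign_speaker_numbers (speakers : List String) (start_number : Int) : List (String × String) :=
  (pvLoopA (PySem.List.dedup speakers) start_number PySem.Dict.empty).items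

-- ===== PORT B =====
-- sum(1 for t in l if t and t != "UNKNOWN")
def pvCount (l : List String) : Nat := (l.filter pvIsValid).length

-- enumerate(xs) is ported as zip of List.range with the list (indices 0..n-1, Nat-exact).
-- unique[:i] is List.take i (exact: 0 ≤ i ≤ len).
def assign_speaker_numbers_alt (speakers : List String) (start_number : Int) : List (String × String) :=
  let unique := (((List.range speakers.length).zip speakers).filter
      (fun p => PySem.List.index? speakers p.2 == some p.1)).map Prod.snd
  (PySem.Dict.ofList (((List.range unique.length).zip unique).map
      (fun p => (p.2, if pvIsValid p.2
        then "Speaker " ++ PySem.Int.toStr (start_number + (pvCount (unique.take p.1) : Int))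
        else "Unknown Speaker")))).items

-- ===== PRECONDITION & SPEC =====
def Spec_assign_speaker_numbers (speakers : List String) (start_number : Int) (out : List (String × String)) : Prop := out = assign_speaker_numbers_alt speakers start_number
instance (speakers : List String) (start_number : Int) (out : List (String × String)) : Decidable (Spec_assign_speaker_numbers speakers start_number out) := by unfold Spec_assign_speaker_numbers; infer_instance

-- ===== CLAIM (what is proved, stated in full; the proofs are below) =====
def Claim_equal_assign_speaker_numbers : Prop := ∀ (speakers : List String) (start_number : Int), Dom_assign_speaker_numbers speakers start_number → Spec_assign_speaker_numbers speakers start_number (assign_speaker_numbers speakers start_number)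

-- ===== LEMMAS AND PROOFS =====

-- Common normal form of both programs' results: the labeled dedup list, counter threaded.
def pvSpecList : List String → Int → List (String × String)
  | [], _ => []
  | s :: rest, n =>
    if pvIsValid s then (s, "Speaker " ++ PySem.Int.toStr n) :: pvSpecList rest (n + 1)
    else (s, "Unknown Speaker") :: pvSpecList rest n

-- first-occurrence index test over a suffix: kept elements = first occurrences not in the prefix
theorem pv_unique_gen (xs pre : List String) :
    (((List.range' pre.length xs.length).zip xs).filter
        (fun p => PySem.List.index? (pre ++ xs) p.2 == some p.1)).map Prod.snd
      = (PySem.Set.ofList xs).filter (fun s => !(pre.contains s)) := by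
  induction xs generalizing pre with
  | nil => simp
  | cons x rest ih =>
    rw [List.length_cons, List.range'_succ, List.zip_cons_cons, List.filter_cons]
    have htail :
        (((List.range' (pre.length + 1) rest.length).zip rest).filter
            (fun p => PySem.List.index? (pre ++ x :: rest) p.2 == some p.1)).map Prod.snd
          = (PySem.Set.ofList rest).filter (fun s => !((pre ++ [x]).contains s)) := by
      have h1 : pre ++ x :: rest = (pre ++ [x]) ++ rest := by simp
      have h2 : pre.length + 1 = (pre ++ [x]).length := by simp
      rw [h1, h2, ih (pre ++ [x])]
    have hcomb : (PySem.Set.ofList rest).filter (fun s => !((pre ++ [x]).contains s))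
        = ((PySem.Set.ofList rest).filter (fun y => !(y == x))).filter
            (fun s => !(pre.contains s)) := by
      rw [List.filter_filter]
      apply List.filter_congr
      intro s _
      simp only [List.contains_append, List.contains_cons, List.contains_nil]
      cases hs : pre.contains s <;> cases hx : s == x <;> simp
    rw [PySem.Set.ofList_cons, PySem.Set.discard, List.filter_cons]
    by_cases hmem : x ∈ pre
    · have hcond : (PySem.List.index? (pre ++ x :: rest) x == some pre.length) = false := by
        rw [beq_eq_false_iff_ne]
        intro hidx
        rcases (PySem.List.index?_eq_some_iff _ _ _).mp hidx with ⟨pre', suf, heq, hlen, hnot⟩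
        rcases List.append_inj heq.symm (by omega) with ⟨hpre, _⟩
        exact hnot (hpre ▸ hmem)
      rw [hcond]
      simp only [Bool.false_eq_true, if_false]
      rw [htail, hcomb, List.contains_iff_mem.mpr hmem]
      simp
    · have hcond : (PySem.List.index? (pre ++ x :: rest) x == some pre.length) = true := by
        rw [beq_iff_eq]
        exact (PySem.List.index?_eq_some_iff _ _ _).mpr ⟨pre, rest, rfl, rfl, hmem⟩
      rw [hcond]
      have hnc : pre.contains x = false := by
        rw [← Bool.not_eq_true, List.contains_iff_mem]; exact hmem
      simp only [hnc, Bool.not_false, if_true, List.map_cons]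
      rw [htail, hcomb]

-- B's unique list IS dict.fromkeys-style dedup
theorem pv_unique_eq (speakers : List String) :
    (((List.range speakers.length).zip speakers).filter
        (fun p => PySem.List.index? speakers p.2 == some p.1)).map Prod.snd
      = PySem.List.dedup speakers := by
  have := pv_unique_gen speakers []
  simpa [List.range_eq_range', PySem.List.dedup] using this

-- B's label-by-prefix-count map over any list equals the counter-threaded normal form.
theorem pv_alt_map (u : List String) (n : Int) :
    ((List.range u.length).zip u).map
        (fun p => (p.2, if pvIsValid p.2
          then "Speaker " ++ PySem.Int.toStr (n + (pvCount (u.take p.1) : Int))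
          else "Unknown Speaker"))
      = pvSpecList u n := by
  induction u generalizing n with
  | nil => simp [pvSpecList]
  | cons x rest ih =>
    rw [List.length_cons, List.range_succ_eq_map, List.zip_cons_cons, List.map_cons,
        List.zip_map_left, List.map_map]
    have hstep :
        (((List.range rest.length).zip rest).map
          ((fun p => ((p : ℕ × String).2, if pvIsValid p.2
            then "Speaker " ++ PySem.Int.toStr (n + (pvCount ((x :: rest).take p.1) : Int))
            else "Unknown Speaker")) ∘ Prod.map Nat.succ id))
          = ((List.range rest.length).zip rest).map
            (fun p => (p.2, if pvIsValid p.2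
              then "Speaker " ++ PySem.Int.toStr
                ((n + (if pvIsValid x then 1 else 0)) + (pvCount (rest.take p.1) : Int))
              else "Unknown Speaker")) := by
      apply List.map_congr_left
      intro p _
      simp only [Function.comp_apply, Prod.map, id_eq]
      have htake : (x :: rest).take (Nat.succ p.1) = x :: rest.take p.1 := rfl
      have hcnt : (pvCount ((x :: rest).take (Nat.succ p.1)) : Int)
          = (if pvIsValid x then 1 else 0) + (pvCount (rest.take p.1) : Int) := by
        rw [htake]
        unfold pvCount
        rw [List.filter_cons]
        by_cases hv : pvIsValid x = true
        · simp only [hv, if_true, List.length_cons]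
          push_cast
          ring_nf
        · have hv' : pvIsValid x = false := by revert hv; cases pvIsValid x <;> simp
          simp [hv']
      rw [hcnt]
      congr 2
      rw [add_assoc]
    rw [hstep, ih]
    show (x, if pvIsValid x then "Speaker " ++ PySem.Int.toStr (n + ((pvCount []) : Int))
          else "Unknown Speaker") :: _ = pvSpecList (x :: rest) n
    by_cases hv : pvIsValid x = true
    · simp only [hv, if_true, pvCount, List.filter_nil, List.length_nil, Nat.cast_zero,
        add_zero, pvSpecList]
    · have hv' : pvIsValid x = false := by revert hv; cases pvIsValid x <;> simp
      simp only [hv', pvSpecList, Bool.false_eq_true, if_false, add_zero]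

-- A's loop over a duplicate-free, dict-fresh list appends the same normal form.
theorem pv_loopA (l : List String) (n : Int) (m : PySem.Dict String String)
    (hnd : l.Nodup) (hfresh : ∀ s ∈ l, m.contains s = false) :
    (pvLoopA l n m).items = m.items ++ pvSpecList l n := by
  induction l generalizing n m with
  | nil => simp [pvLoopA, pvSpecList]
  | cons s rest ih =>
    rcases List.nodup_cons.mp hnd with ⟨hsr, hndr⟩
    have hfs : m.contains s = false := hfresh s (List.mem_cons_self ..)
    have hfresh' : ∀ (v : String), ∀ t ∈ rest, (m.insert s v).contains t = false := by
      intro v t ht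
      rw [PySem.Dict.contains_insert]
      have : (t == s) = false := by
        simp only [beq_eq_false_iff_ne]; intro h; exact hsr (h ▸ ht)
      rw [this, Bool.false_or]; exact hfresh t (List.mem_cons_of_mem _ ht)
    by_cases hv : pvIsValid s = true
    · rw [show pvLoopA (s :: rest) n m
          = pvLoopA rest (n + 1) (m.insert s ("Speaker " ++ PySem.Int.toStr n)) from by
        simp [pvLoopA, hv]]
      rw [ih (n + 1) _ hndr (hfresh' _), PySem.Dict.items_insert_of_not_contains _ _ hfs]
      simp [pvSpecList, hv]
    · have hv' : pvIsValid s = false := by revert hv; cases pvIsValid s <;> simp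
      rw [show pvLoopA (s :: rest) n m = pvLoopA rest n (m.insert s "Unknown Speaker") from by
        simp [pvLoopA, hv']]
      rw [ih n _ hndr (hfresh' _), PySem.Dict.items_insert_of_not_contains _ _ hfs]
      simp [pvSpecList, hv']

-- keys of the normal form: the list itself
theorem pv_spec_fst (u : List String) (n : Int) : (pvSpecList u n).map Prod.fst = u := by
  induction u generalizing n with
  | nil => rfl
  | cons x rest ih =>
    by_cases hv : pvIsValid x = true
    · simp [pvSpecList, hv, ih]
    · have hv' : pvIsValid x = false := by revert hv; cases pvIsValid x <;> simp
      simp [pvSpecList, hv', ih]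

-- B's final dict comprehension over nodup keys returns exactly its pair list.
theorem pv_items_ofList {ν : Type} (ps : List (String × ν)) (hnd : (ps.map Prod.fst).Nodup) :
    (PySem.Dict.ofList ps).items = ps := by
  have h := PySem.Dict.items_foldl_insert_fresh ps Prod.fst Prod.snd PySem.Dict.empty
    (fun a _ => PySem.Dict.contains_empty a.1) hnd
  simpa using h

-- ===== VERDICT (by name: the statement is the Claim_ definition above) =====
theorem assign_speaker_numbers_spec : Claim_equal_assign_speaker_numbers := by
  intro speakers start_number _
  show assign_speaker_numbers speakers start_number = assign_speaker_numbers_alt speakers start_number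
  simp only [assign_speaker_numbers, assign_speaker_numbers_alt, pv_unique_eq speakers]
  rw [pv_loopA _ _ _ (PySem.List.nodup_dedup speakers) (fun s _ => PySem.Dict.contains_empty s)]
  rw [pv_alt_map (PySem.List.dedup speakers) start_number]
  rw [pv_items_ofList _ (by rw [pv_spec_fst]; exact PySem.List.nodup_dedup speakers)]
  rfl
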